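-- pv_equiv track=rewrite | github.com/The-King-12345/Advent-of-Code | 2025/day07/main.py | calc_timelines
-- ===== SOURCE A (Python) =====
-- from functools import cache
--
-- def calc_timelines(graph: list[list[int]]) -> int:
--
--     @cache
--     def search_timelines(row: int, beam: int) -> int:
--         if row == len(graph) - 1:
--             if graph[row][beam] == 1:
--                 return 2
--             else:
--                 return 1
--         else:
--             if graph[row][beam] == 1:
--                 return search_timelines(row+1, beam+1) + search_timelines(row+1, beam-1)
--             else:
--                 return search_timelines(row+1, beam)
--
--
--     for i, num in enumerate(graph[0]):
--         if num == 1: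
--             return search_timelines(1, i)
--
--     return 0
-- ===== SOURCE B (Python) =====
-- def calc_timelines(graph: list[list[int]]) -> int:
--     first = None
--     for i, num in enumerate(graph[0]):
--         if num == 1:
--             first = i
--             break
--     if first is None:
--         return 0
--     counts = {first: 1}
--     row = 1
--     while row != len(graph) - 1:
--         nxt = {}
--         for beam, w in counts.items():
--             if graph[row][beam] == 1:
--                 nxt[beam + 1] = nxt.get(beam + 1, 0) + w
--                 nxt[beam - 1] = nxt.get(beam - 1, 0) + w
--             else:
--                 nxt[beam] = nxt.get(beam, 0) + w
--         counts = nxt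
--         row += 1
--     return sum(w * (2 if graph[row][beam] == 1 else 1) for beam, w in counts.items())
-- ===== Notes on version B (the rewrite author's own statement) =====
-- stated objective: alternative
-- what changed: Replaced the top-down memoized recursion over (row, beam) with an iterative forward DP that carries a dict of beam->timeline-count per row and sums weighted contributions at the last row.
import Mathlib
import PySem

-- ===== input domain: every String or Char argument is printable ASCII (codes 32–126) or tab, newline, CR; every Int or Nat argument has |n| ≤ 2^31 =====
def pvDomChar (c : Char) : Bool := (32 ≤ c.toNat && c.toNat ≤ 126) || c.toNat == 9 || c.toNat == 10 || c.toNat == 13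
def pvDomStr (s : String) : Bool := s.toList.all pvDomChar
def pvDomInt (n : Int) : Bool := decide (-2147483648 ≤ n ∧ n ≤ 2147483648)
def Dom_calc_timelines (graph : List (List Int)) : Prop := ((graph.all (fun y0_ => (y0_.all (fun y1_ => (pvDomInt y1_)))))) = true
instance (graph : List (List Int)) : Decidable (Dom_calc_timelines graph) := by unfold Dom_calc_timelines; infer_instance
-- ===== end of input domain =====

-- B replaces A's memoized top-down recursion by an iterative forward DP over rows carrying a
-- dict of beam -> timeline count (objective: alternative decomposition, same asymptotic cost).

-- ===== PORT A =====

-- graph[row][beam] (beam may be negative: Python wraparound via pyGet?).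
-- The `.getD 0` default is reached only where Python raises IndexError — excluded by Pre_.
def pvCell (graph : List (List Int)) (row : Nat) (beam : Int) : Int :=
  (PySem.List.pyGet? (graph.getD row []) beam).getD 0

-- the `for i, num in enumerate(...): if num == 1: ...` scan both sources contain verbatim
def pvFirstOne : List Int → Nat → Option Nat
  | [], _ => none
  | x :: xs, i => if x = 1 then some i else pvFirstOne xs (i + 1)

-- A's search_timelines (the @cache only memoizes; values are unchanged).
-- The structural fuel argument (called with graph.length; one unit per row step) and the
-- `graph.length ≤ row` guard make the recursion total: Python raises IndexError on graph[row]
-- there (only reachable outside Pre_), and we return 0.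
def pvSearch (graph : List (List Int)) : Nat → Nat → Int → Int
  | 0, _, _ => 0
  | fuel + 1, row, beam =>
    if row = graph.length - 1 then
      if pvCell graph row beam = 1 then 2 else 1
    else if graph.length ≤ row then 0
    else if pvCell graph row beam = 1 then
      pvSearch graph fuel (row + 1) (beam + 1) + pvSearch graph fuel (row + 1) (beam - 1)
    else
      pvSearch graph fuel (row + 1) beam

def calc_timelines (graph : List (List Int)) : Int :=
  match pvFirstOne (graph.headD []) 0 with
  | some i => pvSearch graph graph.length 1 (i : Int)
  | none => 0

-- ===== PORT B =====

-- body of B's inner `for beam, w in counts.items()` loop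
def pvStepFun (graph : List (List Int)) (row : Nat)
    (nxt : PySem.Dict Int Int) (bw : Int × Int) : PySem.Dict Int Int :=
  if pvCell graph row bw.1 = 1 then
    let n1 := nxt.insert (bw.1 + 1) (nxt.getD (bw.1 + 1) 0 + bw.2)
    n1.insert (bw.1 - 1) (n1.getD (bw.1 - 1) 0 + bw.2)
  else
    nxt.insert bw.1 (nxt.getD bw.1 0 + bw.2)

-- one iteration of B's while-loop body (builds `nxt` from `counts`)
def pvStep (graph : List (List Int)) (row : Nat) (counts : PySem.Dict Int Int) :
    PySem.Dict Int Int :=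
  counts.items.foldl (pvStepFun graph row) PySem.Dict.empty

-- B's final `sum(w * (2 if graph[row][beam] == 1 else 1) ...)`
def pvFinal (graph : List (List Int)) (row : Nat) (counts : PySem.Dict Int Int) : Int :=
  counts.items.foldl (fun acc bw => acc + bw.2 * (if pvCell graph row bw.1 = 1 then 2 else 1)) 0

-- B's `while row != len(graph) - 1` loop; the structural fuel argument (called with
-- graph.length) and the `graph.length ≤ row` guard make it total: Python raises IndexError
-- on graph[row] there (only reachable outside Pre_).
def pvLoop (graph : List (List Int)) : Nat → Nat → PySem.Dict Int Int → Int
  | 0, _, _ => 0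
  | fuel + 1, row, counts =>
    if row = graph.length - 1 then pvFinal graph row counts
    else if graph.length ≤ row then 0
    else pvLoop graph fuel (row + 1) (pvStep graph row counts)

def calc_timelines_alt (graph : List (List Int)) : Int :=
  match pvFirstOne (graph.headD []) 0 with
  | some i => pvLoop graph graph.length 1 (PySem.Dict.ofList [((i : Int), 1)])
  | none => 0

-- ===== PRECONDITION & SPEC =====

-- b is a valid Python index into a row of length n
def pvInRange (n : Nat) (b : Int) : Bool := decide (-(n : Int) ≤ b ∧ b < (n : Int))

-- beam positions reachable at the next row, given the current row's cells (a set, no counts)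
def pvReachStep (r : List Int) (s : List Int) : List Int :=
  s.foldl (fun acc b =>
    if (PySem.List.pyGet? r b).getD 0 = 1 then
      PySem.Set.add (PySem.Set.add acc (b + 1)) (b - 1)
    else PySem.Set.add acc b) []

-- every beam position the split propagation reaches stays a valid index of its row
def pvSafe : List (List Int) → List Int → List Int → Bool
  | [], last, s => s.all (fun b => pvInRange last.length b)
  | r :: rs, last, s => s.all (fun b => pvInRange r.length b) && pvSafe rs last (pvReachStep r s)

def pvNoCrash (graph : List (List Int)) : Bool :=
  if (1 : Int) ∈ graph.headD [] then
    decide (2 ≤ graph.length) &&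
      pvSafe graph.tail.dropLast (graph.getLast?.getD []) [((graph.headD []).idxOf 1 : Int)]
  else true

-- Pre_ excludes EXACTLY the inputs on which A raises IndexError (and B raises identically):
-- the empty grid (graph[0]), a single-row grid whose first row contains a 1 (the recursion
-- immediately touches graph[1]), and grids where some reachable beam position leaves the
-- Python index range [-len(row), len(row)-1] of its row; pvSafe tracks only the SET of
-- reachable positions (no counts, no memoization) — it is a safety condition, not a rerun of
-- either program. On every input A returns on, Pre_ holds.
def Pre_calc_timelines (graph : List (List Int)) : Prop :=
  graph ≠ [] ∧ pvNoCrash graph = true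

instance (graph : List (List Int)) : Decidable (Pre_calc_timelines graph) := by
  unfold Pre_calc_timelines; infer_instance

def pvWitness_calc_timelines : List (List Int) := [[1, 0], [0, 0]]

def Spec_calc_timelines (graph : List (List Int)) (out : Int) : Prop := out = calc_timelines_alt graph
instance (graph : List (List Int)) (out : Int) : Decidable (Spec_calc_timelines graph out) := by
  unfold Spec_calc_timelines; infer_instance

-- ===== CLAIM (what is proved, stated in full; the proofs are below) =====
def Claim_equal_calc_timelines : Prop := ∀ (graph : List (List Int)), Dom_calc_timelines graph → Pre_calc_timelines graph → Spec_calc_timelines graph (calc_timelines graph)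

-- ===== LEMMAS AND PROOFS =====

-- weighted sum Σ w * g b over an association list of (beam, weight) pairs
def pvW (g : Int → Int) (l : List (Int × Int)) : Int :=
  (l.map (fun bw => bw.2 * g bw.1)).sum

theorem pvW_nil (g : Int → Int) : pvW g [] = 0 := rfl

theorem pvW_cons (g : Int → Int) (p : Int × Int) (l : List (Int × Int)) :
    pvW g (p :: l) = p.2 * g p.1 + pvW g l := by
  simp [pvW]

-- overwriting the unique entry at key k by (k, v0 + δ) adds δ * g k to the weighted sum
theorem pv_sum_update (l : List (Int × Int)) (k v0 δ : Int) (g : Int → Int)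
    (hmem : (k, v0) ∈ l) (hnd : (l.map Prod.fst).Nodup) :
    pvW g (l.map (fun p => if p.1 == k then (k, v0 + δ) else p)) = pvW g l + δ * g k := by
  induction l with
  | nil => cases hmem
  | cons p rest ih =>
    rw [List.map_cons] at hnd
    obtain ⟨hnd1, hnd2⟩ := List.nodup_cons.mp hnd
    by_cases hp : p.1 = k
    · have hpk : (p.1 == k) = true := by simp [hp]
      have hpe : p = (k, v0) := by
        rcases List.mem_cons.mp hmem with h | h
        · exact h.symm
        · exact absurd (List.mem_map.mpr ⟨(k, v0), h, rfl⟩) (hp ▸ hnd1)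
      have hrest : rest.map (fun p => if p.1 == k then (k, v0 + δ) else p) = rest := by
        conv_rhs => rw [← List.map_id rest]
        apply List.map_congr_left
        intro q hq
        have hqk : (q.1 == k) = false := by
          simp only [beq_eq_false_iff_ne]
          intro hqk
          apply hnd1
          rw [hp, ← hqk]
          exact List.mem_map.mpr ⟨q, hq, rfl⟩
        simp [hqk]
      rw [List.map_cons, if_pos hpk, hrest, pvW_cons, pvW_cons, hpe]
      dsimp only
      ring
    · have hpk : ¬ ((p.1 == k) = true) := by simp [hp]
      have hmem' : (k, v0) ∈ rest := by
        rcases List.mem_cons.mp hmem with h | h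
        · exact absurd (congrArg Prod.fst h.symm) hp
        · exact h
      rw [List.map_cons, if_neg hpk, pvW_cons, pvW_cons, ih hmem' hnd2]
      ring

-- d[k] = d.get(k, 0) + w adds w * g k to the weighted sum over d.items
theorem pv_wsum_insert (d : PySem.Dict Int Int) (hnd : d.keys.Nodup) (k w : Int)
    (g : Int → Int) :
    pvW g ((d.insert k (d.getD k 0 + w)).items) = pvW g d.items + w * g k := by
  by_cases h : d.contains k = true
  · have hk : k ∈ d.items.map Prod.fst := by
      have := (PySem.Dict.contains_iff_mem_keys (d := d) (k := k)).mp h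
      simpa [PySem.Dict.keys] using this
    rcases List.mem_map.mp hk with ⟨p, hp, hpk⟩
    have hpe : (k, p.2) ∈ d.items := by rw [← hpk]; exact hp
    have hgd : d.getD k 0 = p.2 := PySem.Dict.getD_of_mem_items d hpe hnd 0
    rw [PySem.Dict.items_insert_of_contains d _ h, hgd]
    exact pv_sum_update d.items k p.2 w g hpe (by simpa [PySem.Dict.keys] using hnd)
  · have h' : d.contains k = false := by simpa using h
    rw [PySem.Dict.items_insert_of_not_contains d _ h',
        PySem.Dict.getD_of_not_contains d 0 h']
    simp [pvW]

theorem pv_nodup_stepFun (graph : List (List Int)) (row : Nat)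
    (d : PySem.Dict Int Int) (bw : Int × Int) (hnd : d.keys.Nodup) :
    (pvStepFun graph row d bw).keys.Nodup := by
  unfold pvStepFun
  split
  · exact PySem.Dict.nodup_keys_insert _ _ _ (PySem.Dict.nodup_keys_insert _ _ _ hnd)
  · exact PySem.Dict.nodup_keys_insert _ _ _ hnd

theorem pv_nodup_fold (graph : List (List Int)) (row : Nat) :
    ∀ (l : List (Int × Int)) (d : PySem.Dict Int Int), d.keys.Nodup →
      (l.foldl (pvStepFun graph row) d).keys.Nodup := by
  intro l
  induction l with
  | nil => intro d hd; exact hd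
  | cons bw rest ih =>
    intro d hd
    exact ih _ (pv_nodup_stepFun graph row d bw hd)

-- one pass of B's inner loop, measured through any valuation g of the beams
theorem pv_wsum_fold (graph : List (List Int)) (row : Nat) (g : Int → Int) :
    ∀ (l : List (Int × Int)) (d : PySem.Dict Int Int), d.keys.Nodup →
      pvW g ((l.foldl (pvStepFun graph row) d).items)
        = pvW g d.items
          + pvW (fun b => if pvCell graph row b = 1 then g (b + 1) + g (b - 1) else g b) l := by
  intro l
  induction l with
  | nil => intro d hd; simp [pvW_nil]
  | cons bw rest ih =>
    intro d hd
    rw [List.foldl_cons, ih _ (pv_nodup_stepFun graph row d bw hd), pvW_cons]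
    have hstep : pvW g ((pvStepFun graph row d bw).items)
        = pvW g d.items
          + bw.2 * (if pvCell graph row bw.1 = 1 then g (bw.1 + 1) + g (bw.1 - 1) else g bw.1) := by
      unfold pvStepFun
      split
      · rw [pv_wsum_insert _ (PySem.Dict.nodup_keys_insert _ _ _ hd),
            pv_wsum_insert _ hd]
        ring
      · rw [pv_wsum_insert _ hd]
    rw [hstep]
    ring

-- B's loop from row computes Σ w * search_timelines(row, b) over the carried dict
theorem pv_loop_eq_aux (graph : List (List Int)) :
    ∀ (fuel row : Nat) (counts : PySem.Dict Int Int),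
      graph.length - row ≤ fuel → row < graph.length → counts.keys.Nodup →
      pvLoop graph fuel row counts = pvW (fun b => pvSearch graph fuel row b) counts.items := by
  intro fuel
  induction fuel with
  | zero => intro row counts hf hr _; omega
  | succ fuel ih =>
    intro row counts hf hr hnd
    by_cases hlast : row = graph.length - 1
    · show (if row = graph.length - 1 then pvFinal graph row counts
          else if graph.length ≤ row then 0
          else pvLoop graph fuel (row + 1) (pvStep graph row counts)) = _
      rw [if_pos hlast]
      unfold pvFinal
      rw [PySem.List.foldl_add counts.items
            (fun bw => bw.2 * (if pvCell graph row bw.1 = 1 then 2 else 1)) 0]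
      simp only [pvW, zero_add]
      congr 1
      apply List.map_congr_left
      intro p _
      show _ = p.2 * pvSearch graph (fuel + 1) row p.1
      conv_rhs => rw [pvSearch]
      rw [if_pos hlast]
    · show (if row = graph.length - 1 then pvFinal graph row counts
          else if graph.length ≤ row then 0
          else pvLoop graph fuel (row + 1) (pvStep graph row counts)) = _
      rw [if_neg hlast, if_neg (by omega : ¬ graph.length ≤ row)]
      have hr1 : row + 1 < graph.length := by omega
      have hndstep : (pvStep graph row counts).keys.Nodup := by
        unfold pvStep
        exact pv_nodup_fold graph row counts.items PySem.Dict.empty PySem.Dict.nodup_keys_empty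
      rw [ih (row + 1) _ (by omega) hr1 hndstep]
      unfold pvStep
      rw [pv_wsum_fold graph row _ counts.items PySem.Dict.empty PySem.Dict.nodup_keys_empty]
      have hempty : pvW (fun b => pvSearch graph fuel (row + 1) b)
          (PySem.Dict.empty : PySem.Dict Int Int).items = 0 := rfl
      rw [hempty, zero_add]
      simp only [pvW]
      congr 1
      apply List.map_congr_left
      intro p _
      congr 1
      show _ = pvSearch graph (fuel + 1) row p.1
      conv_rhs => rw [pvSearch]
      rw [if_neg hlast, if_neg (by omega : ¬ graph.length ≤ row)]

theorem pv_firstOne_mem (l : List Int) : ∀ (i : Nat) (j : Nat), pvFirstOne l i = some j → (1 : Int) ∈ l := by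
  induction l with
  | nil => intro i j h; cases h
  | cons x xs ih =>
    intro i j h
    rw [pvFirstOne] at h
    by_cases hx : x = 1
    · exact hx ▸ List.mem_cons_self
    · rw [if_neg hx] at h
      exact List.mem_cons_of_mem x (ih (i + 1) j h)

-- ===== VERDICT (by name: the statement is the Claim_ definition above) =====
theorem calc_timelines_spec : Claim_equal_calc_timelines := by
  intro graph _ hpre
  unfold Spec_calc_timelines calc_timelines calc_timelines_alt
  cases hfo : pvFirstOne (graph.headD []) 0 with
  | none => rfl
  | some i =>
    have h1 : (1 : Int) ∈ graph.headD [] := pv_firstOne_mem _ 0 i hfo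
    have hnc := hpre.2
    unfold pvNoCrash at hnc
    rw [if_pos h1] at hnc
    have hlen : 2 ≤ graph.length := by
      rcases Bool.and_eq_true_iff.mp hnc with ⟨h2, _⟩
      exact of_decide_eq_true h2
    show pvSearch graph graph.length 1 (i : Int)
        = pvLoop graph graph.length 1 (PySem.Dict.ofList [((i : Int), 1)])
    rw [pv_loop_eq_aux graph graph.length 1 _ (by omega) (by omega)
          (PySem.Dict.nodup_keys_ofList _)]
    have hitems : (PySem.Dict.ofList [((i : Int), (1 : Int))]).items = [((i : Int), 1)] := by
      simp [PySem.Dict.ofList, PySem.Dict.update, PySem.Dict.insert, PySem.Dict.empty,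
        PySem.Dict.contains]
    rw [hitems]
    simp [pvW]
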